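-- pv_equiv track=rewrite | github.com/PauSolerValades/AoC2023 | day10/part2.py | remove_next_except_jump
-- ===== SOURCE A (Python) =====
-- def remove_next_except_jump(sublist):
--     if not sublist:
--         return []
--
--     # Start with the first tuple
--     result = [sublist[0]]
--
--     for i in range(1, len(sublist)):
--         # Check if non-contiguous with the previous one
--         if sublist[i][1] != sublist[i-1][1] + 1:
--             # Add the last of the contiguous segment
--             if result[-1] != sublist[i-1]:
--                 result.append(sublist[i-1])
--             # Start a new segment
--             result.append(sublist[i])
--
--     # Add the last element if it's not already in the result
--     if result[-1] != sublist[-1]: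
--         result.append(sublist[-1])
--
--     return result
-- ===== SOURCE B (Python) =====
-- def remove_next_except_jump(sublist):
--     if not sublist:
--         return []
--     # Phase 1: partition into maximal contiguous-index groups.
--     groups = []
--     cur = [sublist[0]]
--     for prev, x in zip(sublist, sublist[1:]):
--         if x[1] == prev[1] + 1:
--             cur.append(x)
--         else:
--             groups.append(cur)
--             cur = [x]
--     groups.append(cur)
--     # Phase 2: emit each group's endpoints.
--     out = []
--     for g in groups:
--         out.append(g[0])
--         if len(g) > 1:
--             out.append(g[-1])
--     return out
-- ===== Notes on version B (the rewrite author's own statement) =====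
-- stated objective: alternative
-- what changed: Replaces A's single pass that grows one result list with an append-and-dedup check (result[-1] != prev) by a two-phase structure: first partition the list into maximal contiguous-index groups, then emit each group's first element plus, for groups of length > 1, its last element.
import Mathlib
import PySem

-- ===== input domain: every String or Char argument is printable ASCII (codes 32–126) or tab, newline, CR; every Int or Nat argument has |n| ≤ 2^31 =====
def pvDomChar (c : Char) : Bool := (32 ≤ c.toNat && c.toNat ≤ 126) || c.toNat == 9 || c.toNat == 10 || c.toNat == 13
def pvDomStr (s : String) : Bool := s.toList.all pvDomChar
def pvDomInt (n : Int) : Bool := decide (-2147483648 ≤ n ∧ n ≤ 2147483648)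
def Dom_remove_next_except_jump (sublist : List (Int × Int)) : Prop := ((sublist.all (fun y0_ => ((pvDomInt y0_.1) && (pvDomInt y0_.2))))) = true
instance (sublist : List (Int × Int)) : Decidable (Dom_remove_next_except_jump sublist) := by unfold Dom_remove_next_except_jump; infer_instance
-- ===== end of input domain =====

-- B replaces A's single-pass running-result-with-dedup-check by a two-phase
-- partition-into-contiguous-groups then emit-endpoints structure (objective: alternative).

-- ===== PORT A =====
-- A's loop `for i in range(1, len)` reads sublist[i-1], sublist[i]; ported as a fold
-- over the adjacent pairs (sublist[i-1], sublist[i]) with the same `result` state.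
def pvStepA (result : List (Int × Int)) (p : (Int × Int) × (Int × Int)) : List (Int × Int) :=
  if p.2.2 ≠ p.1.2 + 1 then
    (if result.getLastD (0, 0) ≠ p.1 then result ++ [p.1] else result) ++ [p.2]
  else result

def remove_next_except_jump (sublist : List (Int × Int)) : List (Int × Int) :=
  match sublist with
  | [] => []
  | first :: rest =>
    let result := (List.zip (first :: rest) rest).foldl pvStepA [first]
    if result.getLastD (0, 0) ≠ (first :: rest).getLastD (0, 0) then
      result ++ [(first :: rest).getLastD (0, 0)]
    else result

-- ===== PORT B =====
-- Phase 1 of Source B: split into maximal contiguous-index groups.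
def pvGroupsB (cur : List (Int × Int)) (prev : Int × Int) :
    List (Int × Int) → List (List (Int × Int))
  | [] => [cur]
  | x :: xs =>
    if x.2 = prev.2 + 1 then pvGroupsB (cur ++ [x]) x xs
    else cur :: pvGroupsB [x] x xs

-- Phase 2 of Source B: emit each group's endpoints.
def pvEmitB (out : List (Int × Int)) (groups : List (List (Int × Int))) : List (Int × Int) :=
  groups.foldl
    (fun out g => (out ++ [g.headD (0, 0)]) ++ (if 1 < g.length then [g.getLastD (0, 0)] else []))
    out

def remove_next_except_jump_alt (sublist : List (Int × Int)) : List (Int × Int) :=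
  match sublist with
  | [] => []
  | first :: rest => pvEmitB [] (pvGroupsB [first] first rest)

-- ===== PRECONDITION & SPEC =====
def Spec_remove_next_except_jump (sublist : List (Int × Int)) (out : List (Int × Int)) : Prop := out = remove_next_except_jump_alt sublist
instance (sublist : List (Int × Int)) (out : List (Int × Int)) : Decidable (Spec_remove_next_except_jump sublist out) := by unfold Spec_remove_next_except_jump; infer_instance

-- ===== CLAIM (what is proved, stated in full; the proofs are below) =====
def Claim_equal_remove_next_except_jump : Prop := ∀ (sublist : List (Int × Int)), Dom_remove_next_except_jump sublist → Spec_remove_next_except_jump sublist (remove_next_except_jump sublist)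

-- ===== LEMMAS AND PROOFS =====

-- Reference function: current group started at `start`, last element seen is `prev`.
def pvRef (start prev : Int × Int) : List (Int × Int) → List (Int × Int)
  | [] => start :: (if start ≠ prev then [prev] else [])
  | x :: xs =>
    if x.2 = prev.2 + 1 then pvRef start x xs
    else (start :: (if start ≠ prev then [prev] else [])) ++ pvRef x x xs

theorem pvA_loop (xs : List (Int × Int)) :
    ∀ (prev start : Int × Int) (closed : List (Int × Int)),
      (if (((prev :: xs).zip xs).foldl pvStepA (closed ++ [start])).getLastD (0, 0)
            ≠ (prev :: xs).getLastD (0, 0) then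
        (((prev :: xs).zip xs).foldl pvStepA (closed ++ [start]))
          ++ [(prev :: xs).getLastD (0, 0)]
      else ((prev :: xs).zip xs).foldl pvStepA (closed ++ [start]))
      = closed ++ pvRef start prev xs := by
  induction xs with
  | nil =>
    intro prev start closed
    simp [pvRef]
    by_cases h : start = prev <;> simp [h]
  | cons x xs ih =>
    intro prev start closed
    by_cases h : x.2 = prev.2 + 1
    · have hs : pvStepA (closed ++ [start]) (prev, x) = closed ++ [start] := by
        simp [pvStepA, h]
      simpa [pvRef, h, hs] using ih x start closed
    · have hs : pvStepA (closed ++ [start]) (prev, x)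
          = (closed ++ (start :: (if start ≠ prev then [prev] else []))) ++ [x] := by
        by_cases hsp : start = prev <;>
          simp [pvStepA, h, hsp]
      rw [List.zip_cons_cons, List.foldl_cons, hs]
      have := ih x x (closed ++ (start :: (if start ≠ prev then [prev] else [])))
      simp only [List.getLastD_cons] at this ⊢
      rw [this]
      simp [pvRef, h]

theorem pvB_loop (xs : List (Int × Int)) :
    ∀ (prev start : Int × Int) (cur out : List (Int × Int)),
      cur.headD (0, 0) = start → cur.getLastD (0, 0) = prev →
      prev.2 = start.2 + (cur.length : Int) - 1 → cur ≠ [] →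
      pvEmitB out (pvGroupsB cur prev xs) = out ++ pvRef start prev xs := by
  induction xs with
  | nil =>
    intro prev start cur out hh hl hlen hne
    match cur, hne with
    | [a], _ =>
      simp at hh hl
      simp [pvGroupsB, pvEmitB, pvRef, ← hh, ← hl]
    | a :: b :: t, _ =>
      have hne' : start ≠ prev := by
        intro he
        rw [he] at hlen
        have h2 : (2 : Int) ≤ ((a :: b :: t).length : Int) := by
          simp only [List.length_cons]; push_cast; omega
        omega
      simp only [List.headD_cons] at hh
      have hgt : 1 < (a :: b :: t).length := by simp
      simp only [pvGroupsB, pvEmitB, List.foldl_cons, List.foldl_nil, if_pos hgt, hl]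
      simp [pvRef, hne', hh]
  | cons x xs ih =>
    intro prev start cur out hh hl hlen hne
    by_cases h : x.2 = prev.2 + 1
    · have hh' : (cur ++ [x]).headD (0, 0) = start := by
        match cur, hne with
        | a :: t, _ => simpa using hh
      have hl' : (cur ++ [x]).getLastD (0, 0) = x := by simp
      have hlen' : x.2 = start.2 + ((cur ++ [x]).length : Int) - 1 := by
        simp only [List.length_append, List.length_cons, List.length_nil]
        push_cast; omega
      have := ih x start (cur ++ [x]) out hh' hl' hlen' (by simp)
      simpa [pvGroupsB, h, pvRef] using this
    · -- close the current group, start a new one at x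
      match cur, hne with
      | [a], _ =>
        simp at hh hl
        rw [show pvGroupsB [a] prev (x :: xs) = [a] :: pvGroupsB [x] x xs by
          simp [pvGroupsB, h]]
        have hstep : pvEmitB out ([a] :: pvGroupsB [x] x xs)
            = pvEmitB (out ++ [a]) (pvGroupsB [x] x xs) := by
          simp [pvEmitB]
        have hrec := ih x x [x] (out ++ [a]) (by simp) (by simp) (by simp) (by simp)
        have h' : ¬x.2 = a.2 + 1 := by rw [hl]; exact h
        rw [hstep, hrec]
        simp [← hh, ← hl, pvRef, h']
      | a :: b :: t, _ =>
        have hne' : start ≠ prev := by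
          intro he
          rw [he] at hlen
          have h2 : (2 : Int) ≤ ((a :: b :: t).length : Int) := by
            simp only [List.length_cons]; push_cast; omega
          omega
        simp only [List.headD_cons] at hh
        have hgt : 1 < (a :: b :: t).length := by simp
        rw [show pvGroupsB (a :: b :: t) prev (x :: xs) = (a :: b :: t) :: pvGroupsB [x] x xs by
          simp [pvGroupsB, h]]
        have hstep : pvEmitB out ((a :: b :: t) :: pvGroupsB [x] x xs)
            = pvEmitB ((out ++ [a]) ++ [prev]) (pvGroupsB [x] x xs) := by
          have hl2 : (b :: t).getLast?.getD (0, 0) = prev := by simpa using hl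
          simp [pvEmitB, hl2]
        have hrec := ih x x [x] ((out ++ [a]) ++ [prev]) (by simp) (by simp) (by simp) (by simp)
        rw [hstep, hrec]
        simp [pvRef, h, hne', hh]

-- ===== VERDICT (by name: the statement is the Claim_ definition above) =====
theorem remove_next_except_jump_spec : Claim_equal_remove_next_except_jump := by
  intro sublist _
  unfold Spec_remove_next_except_jump
  match sublist with
  | [] => rfl
  | first :: rest =>
    have hA := pvA_loop rest first first ([] : List (Int × Int))
    have hB := pvB_loop rest first first [first] [] (by simp) (by simp) (by simp) (by simp)
    simp only [List.nil_append] at hA hB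
    simp only [remove_next_except_jump, remove_next_except_jump_alt]
    rw [hB]
    simpa using hA
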